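-- pv_equiv track=rewrite | github.com/emmanuel313/silver-umbrella | tan^n_solver.py | tan_reduction_string
-- ===== SOURCE A (Python) =====
-- def tan_reduction_string(exponent, var):
--     """Return a string representing ∫ tan^exponent(var) d(var)
--        using the reduction formula.
--        exponent can be an integer or a symbolic name (like 'n')."""
--     if exponent == 0:
--         return var
--     elif exponent == 1:
--         return f"∫ tan({var}) d{var}"          # Keep as unevaluated integral
--     else:
--         # Check if exponent is an integer for recursive expansion
--         if isinstance(exponent, int) or (isinstance(exponent, str) and exponent.isdigit()):
--             exp_int = int(exponent)
--             if exp_int == 0: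
--                 return var
--             elif exp_int == 1:
--                 return f"∫ tan({var}) d{var}"
--             else:
--                 # ∫ tan^n x dx = tan^{n-1}x/(n-1) - ∫ tan^{n-2}x dx
--                 term1 = f"tan({var})^{exp_int-1} / {exp_int-1}"
--                 term2 = tan_reduction_string(exp_int - 2, var)
--                 return f"{term1} - ({term2})"
--         else:
--             # Symbolic exponent (like 'n')
--             return f"tan({var})^{{{exponent}-1}} / ({exponent}-1) - ∫ tan({var})^{{{exponent}-2}} d{var}"
-- ===== SOURCE B (Python) =====
-- def tan_reduction_string(exponent, var):
--     """Iterative re-implementation: collect the outer reduction terms in a loop,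
--        then fold them right-to-left around the base case."""
--     if exponent == 0:
--         return var
--     elif exponent == 1:
--         return f"∫ tan({var}) d{var}"
--     if isinstance(exponent, int) or (isinstance(exponent, str) and exponent.isdigit()):
--         e = int(exponent)
--         terms = []
--         while e >= 2:
--             terms.append(f"tan({var})^{e-1} / {e-1}")
--             e -= 2
--         result = var if e == 0 else f"∫ tan({var}) d{var}"
--         for t in reversed(terms):
--             result = f"{t} - ({result})"
--         return result
--     else:
--         return f"tan({var})^{{{exponent}-1}} / ({exponent}-1) - ∫ tan({var})^{{{exponent}-2}} d{var}"
-- ===== Notes on version B (the rewrite author's own statement) =====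
-- stated objective: alternative
-- what changed: Replaces the linear recursion with an explicit loop that collects the reduction terms and a right-to-left fold that rebuilds the nested string; negative integer exponents, on which A recurses forever and raises RecursionError, are excluded by Pre_.
import Mathlib
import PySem

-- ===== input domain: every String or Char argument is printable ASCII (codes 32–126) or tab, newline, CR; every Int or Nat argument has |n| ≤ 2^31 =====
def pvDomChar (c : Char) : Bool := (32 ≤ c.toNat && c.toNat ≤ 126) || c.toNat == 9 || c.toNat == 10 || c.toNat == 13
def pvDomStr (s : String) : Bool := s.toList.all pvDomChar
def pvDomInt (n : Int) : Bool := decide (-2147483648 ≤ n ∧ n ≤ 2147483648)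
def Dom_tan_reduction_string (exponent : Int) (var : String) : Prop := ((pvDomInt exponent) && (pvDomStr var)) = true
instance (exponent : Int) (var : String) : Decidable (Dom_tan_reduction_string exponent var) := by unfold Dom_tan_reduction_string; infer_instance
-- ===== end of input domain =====

-- B replaces A's linear recursion by a loop collecting the reduction terms plus a
-- right-to-left fold; alternative decomposition, same cost.

-- ===== PORT A =====
-- Literal port of A. The int-branch always holds for an Int exponent; on exponent < 0
-- Python recurses forever (RecursionError) — outside Pre_, the port returns "" there
-- (a totality guard only, not an algorithm switch).
def tan_reduction_string (exponent : Int) (var : String) : String :=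
  if exponent == 0 then var
  else if exponent == 1 then "∫ tan(" ++ var ++ ") d" ++ var
  else if exponent ≥ 2 then
    let term1 := "tan(" ++ var ++ ")^" ++ PySem.Int.toStr (exponent - 1) ++ " / " ++ PySem.Int.toStr (exponent - 1)
    let term2 := tan_reduction_string (exponent - 2) var
    term1 ++ " - (" ++ term2 ++ ")"
  else ""  -- Python diverges here (exponent < 0); excluded by Pre_
termination_by exponent.toNat
decreasing_by omega

-- ===== PORT B =====
-- the while-loop of Source B: returns the list of appended terms and the final e
def altCollect (e : Int) (var : String) : List String × Int :=
  if e ≥ 2 then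
    let rest := altCollect (e - 2) var
    (("tan(" ++ var ++ ")^" ++ PySem.Int.toStr (e - 1) ++ " / " ++ PySem.Int.toStr (e - 1)) :: rest.1, rest.2)
  else ([], e)
termination_by e.toNat
decreasing_by omega

def tan_reduction_string_alt (exponent : Int) (var : String) : String :=
  if exponent == 0 then var
  else if exponent == 1 then "∫ tan(" ++ var ++ ") d" ++ var
  else
    let p := altCollect exponent var
    let base := if p.2 == 0 then var else "∫ tan(" ++ var ++ ") d" ++ var
    p.1.foldr (fun t acc => t ++ " - (" ++ acc ++ ")") base

-- ===== PRECONDITION & SPEC =====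
-- Pre_ excludes exponent < 0, on which Python A recurses forever and raises RecursionError.
def Pre_tan_reduction_string (exponent : Int) (var : String) : Prop := 0 ≤ exponent
instance (exponent : Int) (var : String) : Decidable (Pre_tan_reduction_string exponent var) := by unfold Pre_tan_reduction_string; infer_instance
def pvWitness_tan_reduction_string : Int × String := (5, "x")

def Spec_tan_reduction_string (exponent : Int) (var : String) (out : String) : Prop := out = tan_reduction_string_alt exponent var
instance (exponent : Int) (var : String) (out : String) : Decidable (Spec_tan_reduction_string exponent var out) := by unfold Spec_tan_reduction_string; infer_instance

-- ===== CLAIM (what is proved, stated in full; the proofs are below) =====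
def Claim_equal_tan_reduction_string : Prop := ∀ (exponent : Int) (var : String), Dom_tan_reduction_string exponent var → Pre_tan_reduction_string exponent var → Spec_tan_reduction_string exponent var (tan_reduction_string exponent var)

-- ===== LEMMAS AND PROOFS =====

-- A equals the fold of the collected terms, for every nonnegative exponent
theorem tan_fold_eq (e : Int) (var : String) (he : 0 ≤ e) :
    tan_reduction_string e var =
      (altCollect e var).1.foldr (fun t acc => t ++ " - (" ++ acc ++ ")")
        (if (altCollect e var).2 == 0 then var else "∫ tan(" ++ var ++ ") d" ++ var) := by
  by_cases h2 : e ≥ 2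
  · have := tan_fold_eq (e - 2) var (by omega)
    rw [tan_reduction_string, altCollect]
    simp only [if_pos h2]
    have h0 : ¬ (e == 0) := by simp; omega
    have h1 : ¬ (e == 1) := by simp; omega
    simp only [h0, h1, if_false, Bool.false_eq_true, List.foldr_cons]
    rw [this]
  · interval_cases e
    · rw [tan_reduction_string, altCollect]; simp
    · rw [tan_reduction_string, altCollect]; simp
termination_by e.toNat
decreasing_by omega

-- ===== VERDICT (by name: the statement is the Claim_ definition above) =====
theorem tan_reduction_string_spec : Claim_equal_tan_reduction_string := by
  intro e var _ hpre
  unfold Spec_tan_reduction_string tan_reduction_string_alt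
  by_cases h0 : e = 0
  · subst h0; rw [tan_reduction_string]; simp
  · by_cases h1 : e = 1
    · subst h1; rw [tan_reduction_string]; simp
    · have hb0 : ¬ (e == 0) := by simp [h0]
      have hb1 : ¬ (e == 1) := by simp [h1]
      simp only [hb0, hb1, if_false, Bool.false_eq_true]
      exact tan_fold_eq e var hpre
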